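-- pv_equiv track=rewrite | github.com/noDefinition/works | bert/tensorflow/tokenization.py | _run_split_on_punc
-- ===== SOURCE A (Python) =====
-- import unicodedata
--
-- def _run_split_on_punc(text):
--     """Splits punctuation on a piece of text."""
--     chars = list(text)
--     i = 0
--     start_new_word = True
--     output = []
--     while i < len(chars):
--         char = chars[i]
--         if _is_punctuation(char):
--             output.append([char])
--             start_new_word = True
--         else:
--             if start_new_word:
--                 output.append([])
--             start_new_word = False
--             output[-1].append(char)
--         i += 1
--     return ["".join(x) for x in output]
--
-- def _is_punctuation(char):
--     """ Checks whether `chars` is a punctuation character. """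
--     cp = ord(char)
--     # We treat all non-letter/number ASCII as punctuation.
--     # Characters such as "^", "$", and "`" are not in the Unicode Punctuation
--     # class but we treat them as punctuation anyways, for consistency.
--     if (33 <= cp <= 47) or (58 <= cp <= 64) or (91 <= cp <= 96) or (123 <= cp <= 126):
--         return True
--     if unicodedata.category(char).startswith("P"):
--         return True
--     return False
-- ===== SOURCE B (Python) =====
-- import unicodedata
--
-- def _run_split_on_punc(text):
--     """Splits punctuation on a piece of text (run-based scan)."""
--     output = []
--     i, n = 0, len(text)
--     while i < n:
--         if _is_punctuation(text[i]):
--             output.append(text[i])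
--             i += 1
--         else:
--             j = i + 1
--             while j < n and not _is_punctuation(text[j]):
--                 j += 1
--             output.append(text[i:j])
--             i = j
--     return output
--
-- def _is_punctuation(char):
--     cp = ord(char)
--     if (33 <= cp <= 47) or (58 <= cp <= 64) or (91 <= cp <= 96) or (123 <= cp <= 126):
--         return True
--     if unicodedata.category(char).startswith("P"):
--         return True
--     return False
-- ===== Notes on version B (the rewrite author's own statement) =====
-- stated objective: simpler
-- what changed: Replaces the char-by-char loop with start_new_word flag, list-of-lists output[-1] mutation and final join pass by a run-based scan that emits each punctuation char directly and slices out each maximal non-punctuation run as one string token in a single pass.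
import Mathlib
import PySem

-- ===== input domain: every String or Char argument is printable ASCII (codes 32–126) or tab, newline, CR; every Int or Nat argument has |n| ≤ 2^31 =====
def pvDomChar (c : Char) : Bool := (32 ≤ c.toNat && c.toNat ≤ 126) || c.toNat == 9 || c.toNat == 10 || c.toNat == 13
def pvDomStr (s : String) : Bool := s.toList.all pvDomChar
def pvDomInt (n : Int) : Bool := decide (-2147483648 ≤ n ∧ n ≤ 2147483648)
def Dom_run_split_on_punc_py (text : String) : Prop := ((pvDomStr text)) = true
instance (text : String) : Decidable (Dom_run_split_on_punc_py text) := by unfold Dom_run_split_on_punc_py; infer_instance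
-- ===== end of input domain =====

-- B replaces A's flag-driven char loop (with output[-1] mutation and a final join pass)
-- by a run-based scan emitting punctuation chars and whole non-punctuation runs: simpler.


-- ===== PORT A =====
-- _is_punctuation: on the ASCII domain the unicodedata P-category branch never fires
-- (the remaining ASCII chars are space/tab/newline/CR (Cc/Zs), digits and letters),
-- so the ASCII range test is exact there.
def pyIsPunct (c : Char) : Bool :=
  let cp := c.toNat
  (33 ≤ cp && cp ≤ 47) || (58 ≤ cp && cp ≤ 64) || (91 ≤ cp && cp ≤ 96) || (123 ≤ cp && cp ≤ 126)

-- output[-1].append(char); the [] case is unreachable (output is nonempty whenever called)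
def pvAppendLast : List (List Char) → Char → List (List Char)
  | [], _ => []
  | [w], c => [w ++ [c]]
  | x :: xs, c => x :: pvAppendLast xs c

-- the while loop over chars, state = (output, start_new_word)
def pvRunSplitLoop : List Char → List (List Char) → Bool → List (List Char)
  | [], output, _ => output
  | c :: rest, output, snw =>
    if pyIsPunct c then pvRunSplitLoop rest (output ++ [[c]]) true
    else pvRunSplitLoop rest (pvAppendLast (if snw then output ++ [[]] else output) c) false

def run_split_on_punc_py (text : String) : List String :=
  (pvRunSplitLoop text.toList [] true).map (fun x => String.mk x)

-- ===== PORT B =====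
-- run-based scan: a punctuation char is its own token; otherwise take the whole
-- maximal non-punctuation run (B's inner j-scan = takeWhile/dropWhile) as one token
def pvSplitRuns : List Char → List String
  | [] => []
  | c :: rest =>
    if pyIsPunct c then String.mk [c] :: pvSplitRuns rest
    else
      String.mk (c :: rest.takeWhile (fun d => !pyIsPunct d)) ::
        pvSplitRuns (rest.dropWhile (fun d => !pyIsPunct d))
termination_by l => l.length
decreasing_by
  · simp
  · have := List.length_dropWhile_le (fun d => !pyIsPunct d) rest
    simp; omega

def run_split_on_punc_py_alt (text : String) : List String :=
  pvSplitRuns text.toList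

-- ===== PRECONDITION & SPEC =====
def Spec_run_split_on_punc_py (text : String) (out : List String) : Prop := out = run_split_on_punc_py_alt text
instance (text : String) (out : List String) : Decidable (Spec_run_split_on_punc_py text out) := by unfold Spec_run_split_on_punc_py; infer_instance

-- ===== CLAIM (what is proved, stated in full; the proofs are below) =====
def Claim_equal_run_split_on_punc_py : Prop := ∀ (text : String), Dom_run_split_on_punc_py text → Spec_run_split_on_punc_py text (run_split_on_punc_py text)

-- ===== LEMMAS AND PROOFS =====

theorem pvAppendLast_snoc (xs : List (List Char)) (w : List Char) (c : Char) :
    pvAppendLast (xs ++ [w]) c = xs ++ [w ++ [c]] := by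
  induction xs with
  | nil => rfl
  | cons x xs ih =>
    cases xs with
    | nil => rfl
    | cons y ys => simpa [pvAppendLast] using ih

-- the accumulator splits off: output is only ever appended to (or its last word extended)
theorem pvRunSplitLoop_acc (r : List Char) :
    (∀ acc, pvRunSplitLoop r acc true = acc ++ pvRunSplitLoop r [] true) ∧
    (∀ acc w, pvRunSplitLoop r (acc ++ [w]) false = acc ++ pvRunSplitLoop r [w] false) := by
  induction r with
  | nil => simp [pvRunSplitLoop]
  | cons c rest ih =>
    constructor
    · intro acc
      by_cases h : pyIsPunct c = true
      · simp only [pvRunSplitLoop, h, if_pos]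
        rw [ih.1 (acc ++ [[c]]), ih.1 ([] ++ [[c]])]
        simp
      · simp only [pvRunSplitLoop, h, if_neg, Bool.not_eq_true, if_true]
        rw [pvAppendLast_snoc acc [] c, pvAppendLast_snoc ([] : List (List Char)) [] c,
            ih.2 acc ([] ++ [c])]
        simp
    · intro acc w
      by_cases h : pyIsPunct c = true
      · simp only [pvRunSplitLoop, h, if_pos]
        rw [ih.1 (acc ++ [w] ++ [[c]]), ih.1 ([w] ++ [[c]])]
        simp
      · simp only [pvRunSplitLoop, h, if_neg, Bool.not_eq_true]
        rw [pvAppendLast_snoc acc w c,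
            show pvAppendLast [w] c = [w ++ [c]] from rfl, ih.2 acc (w ++ [c])]

-- main correspondence between A's loop and B's run-based scan
theorem pvLoop_eq_runs (r : List Char) :
    ((pvRunSplitLoop r [] true).map (fun x => String.mk x) = pvSplitRuns r) ∧
    (∀ w, (pvRunSplitLoop r [w] false).map (fun x => String.mk x) =
      String.mk (w ++ r.takeWhile (fun d => !pyIsPunct d)) ::
        pvSplitRuns (r.dropWhile (fun d => !pyIsPunct d))) := by
  induction r with
  | nil => simp [pvRunSplitLoop, pvSplitRuns]
  | cons c rest ih =>
    constructor
    · by_cases h : pyIsPunct c = true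
      · simp only [pvRunSplitLoop, h, if_pos, pvSplitRuns]
        rw [show ([] : List (List Char)) ++ [[c]] = [[c]] from rfl,
            show ([[c]] : List (List Char)) = [] ++ [[c]] from rfl]
        rw [(pvRunSplitLoop_acc rest).1]
        simp [ih.1]
      · simp only [pvRunSplitLoop, h, if_neg, Bool.not_eq_true, if_true, pvSplitRuns]
        rw [show pvAppendLast ([] ++ [([] : List Char)]) c = [[c]] from rfl]
        rw [ih.2 [c]]
        simp [h]
    · intro w
      by_cases h : pyIsPunct c = true
      · simp only [pvRunSplitLoop, h, if_pos]
        rw [show ([w] : List (List Char)) ++ [[c]] = [w] ++ [[c]] from rfl,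
            (pvRunSplitLoop_acc rest).1]
        simp only [List.takeWhile, List.dropWhile, h, Bool.not_true, pvSplitRuns, if_pos]
        simp [ih.1]
      · simp only [pvRunSplitLoop, h, if_neg, Bool.not_eq_true, if_false]
        rw [show pvAppendLast [w] c = [w ++ [c]] from rfl]
        rw [ih.2 (w ++ [c])]
        simp [List.takeWhile, List.dropWhile, h]

-- ===== VERDICT (by name: the statement is the Claim_ definition above) =====
theorem run_split_on_punc_py_spec : Claim_equal_run_split_on_punc_py := by
  intro text _
  show run_split_on_punc_py text = run_split_on_punc_py_alt text
  unfold run_split_on_punc_py run_split_on_punc_py_alt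
  exact (pvLoop_eq_runs text.toList).1
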